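-- pv_equiv track=rewrite | github.com/busyweaver/temporal_nest | temporal_nest_lib.py | seq_graphs
-- ===== SOURCE A (Python) =====
-- def seq_graphs(g):
--     d = dict()
--     for e in g:
--         u,v,t = e
--         if t not in d:
--             d[t] = {(u,v)}
--         else:
--             d[t].add((u,v))
--     return d
-- ===== SOURCE B (Python) =====
-- def seq_graphs(g):
--     ts = list(dict.fromkeys(t for (_, _, t) in g))
--     return {t: {(u, v) for (u, v, tt) in g if tt == t} for t in ts}
-- ===== Notes on version B (the rewrite author's own statement) =====
-- stated objective: alternative
-- what changed: Replaces the single-pass mutate-a-dict-of-sets bucketing with a two-phase decomposition: first dedup the timestamps in first-occurrence order, then build each group by a set-comprehension scan of the edge list per timestamp.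
import Mathlib
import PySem

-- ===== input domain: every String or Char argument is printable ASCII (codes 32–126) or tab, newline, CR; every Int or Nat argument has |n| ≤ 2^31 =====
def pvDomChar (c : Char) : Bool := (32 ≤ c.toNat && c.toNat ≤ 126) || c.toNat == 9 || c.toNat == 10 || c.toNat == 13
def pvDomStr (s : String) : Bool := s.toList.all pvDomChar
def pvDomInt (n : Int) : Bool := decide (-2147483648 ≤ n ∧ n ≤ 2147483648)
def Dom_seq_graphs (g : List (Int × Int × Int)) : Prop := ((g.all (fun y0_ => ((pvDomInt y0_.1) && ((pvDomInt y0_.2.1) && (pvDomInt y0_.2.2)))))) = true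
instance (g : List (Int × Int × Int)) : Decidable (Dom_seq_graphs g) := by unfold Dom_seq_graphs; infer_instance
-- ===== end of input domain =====

-- B replaces A's single-pass dict-of-sets mutation with a two-phase dedup-then-scan comprehension (alternative decomposition, not faster).
-- ===== PORT A =====
-- A: one pass; for each edge (u,v,t): if t not yet a key, d[t] = {(u,v)}, else d[t].add((u,v)); return d.items
def seq_graphs (g : List (Int × Int × Int)) : List (Int × List (Int × Int)) :=
  (g.foldl (fun (d : PySem.Dict Int (PySem.Set (Int × Int))) e =>
    let u := e.1; let v := e.2.1; let t := e.2.2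
    if d.contains t then
      d.modify t PySem.Set.empty (fun s => PySem.Set.add s (u, v))
    else
      d.insert t (PySem.Set.ofList [(u, v)])) PySem.Dict.empty).items

-- ===== PORT B =====
-- B: dedup the timestamps in first-occurrence order, then one set-comprehension scan per timestamp
def seq_graphs_alt (g : List (Int × Int × Int)) : List (Int × List (Int × Int)) :=
  (PySem.List.dedup (g.map (fun e => e.2.2))).map (fun t =>
    (t, PySem.Set.ofList ((g.filter (fun e => e.2.2 == t)).map (fun e => (e.1, e.2.1)))))

-- ===== PRECONDITION & SPEC =====
def Spec_seq_graphs (g : List (Int × Int × Int)) (out : List (Int × List (Int × Int))) : Prop := out = seq_graphs_alt g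
instance (g : List (Int × Int × Int)) (out : List (Int × List (Int × Int))) : Decidable (Spec_seq_graphs g out) := by unfold Spec_seq_graphs; infer_instance

-- ===== CLAIM (what is proved, stated in full; the proofs are below) =====
def Claim_equal_seq_graphs : Prop := ∀ (g : List (Int × Int × Int)), Dom_seq_graphs g → Spec_seq_graphs g (seq_graphs g)

-- ===== LEMMAS AND PROOFS =====

-- A's loop body is 'modify' in both branches
lemma step_eq_modify (d : PySem.Dict Int (PySem.Set (Int × Int))) (e : Int × Int × Int) :
    (if d.contains e.2.2 then
      d.modify e.2.2 PySem.Set.empty (fun s => PySem.Set.add s (e.1, e.2.1))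
    else
      d.insert e.2.2 (PySem.Set.ofList [(e.1, e.2.1)])) =
    d.modify e.2.2 PySem.Set.empty (fun s => PySem.Set.add s (e.1, e.2.1)) := by
  by_cases h : d.contains e.2.2
  · rw [if_pos h]
  · have hm : d.modify e.2.2 PySem.Set.empty (fun s => PySem.Set.add s (e.1, e.2.1))
        = d.insert e.2.2 (PySem.Set.add (d.getD e.2.2 PySem.Set.empty) (e.1, e.2.1)) := by
      simp [PySem.Dict.modify, PySem.Dict.getD]
    rw [if_neg h, hm, PySem.Dict.getD_of_not_contains d PySem.Set.empty (Bool.not_eq_true _ ▸ h)]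
    rfl

lemma getD_loop (l : List (Int × Int × Int)) (d : PySem.Dict Int (PySem.Set (Int × Int))) (t : Int) :
    (l.foldl (fun d e => d.modify e.2.2 PySem.Set.empty (fun s => PySem.Set.add s (e.1, e.2.1))) d).getD t PySem.Set.empty
      = PySem.Set.update (d.getD t PySem.Set.empty) ((l.filter (fun e => e.2.2 == t)).map (fun e => (e.1, e.2.1))) := by
  induction l generalizing d with
  | nil => simp [PySem.Set.update]
  | cons e l ih =>
    rw [List.foldl_cons, ih, PySem.Dict.getD_modify]
    by_cases h : e.2.2 = t
    · simp [h, PySem.Set.update_cons]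
    · simp [h, Ne.symm h]

-- ===== VERDICT (by name: the statement is the Claim_ definition above) =====
theorem seq_graphs_spec : Claim_equal_seq_graphs := by
  intro g _
  show seq_graphs g = seq_graphs_alt g
  unfold seq_graphs seq_graphs_alt
  have hf : (fun (d : PySem.Dict Int (PySem.Set (Int × Int))) (e : Int × Int × Int) =>
      let u := e.1; let v := e.2.1; let t := e.2.2
      if d.contains t then
        d.modify t PySem.Set.empty (fun s => PySem.Set.add s (u, v))
      else
        d.insert t (PySem.Set.ofList [(u, v)]))
      = (fun d e => d.modify e.2.2 PySem.Set.empty (fun s => PySem.Set.add s (e.1, e.2.1))) := by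
    funext d e
    exact step_eq_modify d e
  rw [hf]
  set dfin := g.foldl (fun d e => d.modify e.2.2 PySem.Set.empty (fun s => PySem.Set.add s (e.1, e.2.1))) PySem.Dict.empty with hd
  have hkeys : dfin.keys = PySem.List.dedup (g.map (fun e => e.2.2)) := by
    rw [hd, PySem.Dict.keys_foldl_modify_key]
    simp [PySem.Set.update_nil_left]
  have hnd : dfin.keys.Nodup := by
    rw [hkeys]; simp [PySem.List.dedup_eq_ofList, PySem.Set.nodup_ofList]
  rw [PySem.Dict.items_eq_map_keys dfin hnd PySem.Set.empty, hkeys]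
  refine List.map_congr_left (fun t _ => ?_)
  rw [hd, getD_loop]
  simp [PySem.Dict.getD_empty, PySem.Set.update_nil_left]
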